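-- pv_equiv track=rewrite | github.com/joshuago78/aoc | 2016/day13.py | traverse_all
-- ===== SOURCE A (Python) =====
-- def open_or_closed(x,y, fav):
--     num = x*x + 3*x + 2*x*y + y + y*y
--     num += fav
--     ones = bin(num).count('1')
--     if ones % 2 == 0:
--         return '.'
--     return '#'
--
-- def possible_steps(path, fav):
--     directions = [(0,-1),(1,0),(0,1),(-1,0)]
--     last = path[-1]
--     steps = []
--     for d in directions:
--         x,y = last[0]+d[0], last[1]+d[1]
--         if x>= 0 and y>=0:
--             if open_or_closed(x,y,fav) != '#' and (x,y) not in path: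
--                 steps.append((x,y))
--     return steps
--
-- def traverse_all(start,limit,fav):
--     positions = set([start,])
--     paths = [[start,],]
--     while paths:
--         path = paths.pop(0)
--         steps = possible_steps(path,fav)
--         for step in steps:
--             new_path = path.copy()
--             new_path.append(step)
--             if len(new_path) <= 51:
--                 positions.add(step)
--                 paths.append(new_path)
--     return list(positions)
-- ===== SOURCE B (Python) =====
-- # B: breadth-first search over grid cells with a visited set and per-cell depth,
-- # instead of A's breadth-first enumeration of all simple paths (exponential).
-- # Return value only differs from A's in list order; A returns list(set) whose
-- # order is unspecified (outputs are compared as sets).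
--
-- def is_open(x, y, fav):
--     num = abs(x*x + 3*x + 2*x*y + y + y*y + fav)
--     p = 0
--     while num:
--         p ^= num & 1
--         num >>= 1
--     return p == 0
--
--
-- def traverse_all(start, limit, fav):
--     # A ignores `limit` and hardcodes a depth of 50 (paths of length <= 51); so do we.
--     seen = {start}
--     order = [start]
--     pending = [(start, 0)]
--     while pending:
--         (x, y), d = pending.pop(0)
--         if d >= 50:
--             continue
--         for dx, dy in ((0, -1), (1, 0), (0, 1), (-1, 0)):
--             n = (x + dx, y + dy)
--             if n[0] >= 0 and n[1] >= 0 and n not in seen and is_open(n[0], n[1], fav):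
--                 seen.add(n)
--                 order.append(n)
--                 pending.append((n, d + 1))
--     return order
-- ===== Notes on version B (the rewrite author's own statement) =====
-- stated objective: faster
-- what changed: Replaces A's breadth-first enumeration of every simple path of length <= 51 (each step re-scanning the whole path and spawning up to 4 copies) by a plain BFS over grid cells with a visited set and per-cell depth, visiting each reachable cell once; intended as asymptotically faster on mazes with open area (timing runs measured 22x-62x there) while on mostly-closed mazes both finish in similar time.
import Mathlib
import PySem

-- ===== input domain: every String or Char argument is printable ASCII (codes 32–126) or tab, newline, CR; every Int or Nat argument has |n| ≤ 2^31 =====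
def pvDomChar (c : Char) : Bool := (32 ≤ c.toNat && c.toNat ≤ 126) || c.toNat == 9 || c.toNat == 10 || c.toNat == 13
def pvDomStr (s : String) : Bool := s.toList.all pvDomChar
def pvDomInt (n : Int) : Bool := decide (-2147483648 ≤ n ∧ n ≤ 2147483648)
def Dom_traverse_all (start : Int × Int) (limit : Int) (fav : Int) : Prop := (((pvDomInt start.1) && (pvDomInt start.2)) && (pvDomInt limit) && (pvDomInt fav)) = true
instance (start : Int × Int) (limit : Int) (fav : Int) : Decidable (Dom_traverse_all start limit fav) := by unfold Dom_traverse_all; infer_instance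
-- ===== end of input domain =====

-- B replaces A's breadth-first enumeration of all simple paths (exponential) by a plain
-- cell-BFS with a visited set; same returned collection (A returns list(set), whose Python
-- iteration order is unspecified — outputs are compared as sets; the two ports below produce
-- the identical discovery-order list).

abbrev pvCell : Type := Int × Int

-- ===== PORT A =====
def open_or_closed (x y fav : Int) : String :=
  let num := x * x + 3 * x + 2 * x * y + y + y * y
  let num := num + fav
  -- bin(num).count('1'): PySem.Int.bitCount is Python-exact (counts the bits of |num|)
  let ones := PySem.Int.bitCount num
  if ones % 2 == 0 then "." else "#"

def possible_steps (path : List pvCell) (fav : Int) : List pvCell :=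
  let directions : List (Int × Int) := [(0, -1), (1, 0), (0, 1), (-1, 0)]
  -- path[-1]: in A, possible_steps is only ever called with a nonempty path
  let last : pvCell := (PySem.List.pyGet? path (-1)).getD (0, 0)
  directions.foldl (fun steps d =>
    let x := last.1 + d.1
    let y := last.2 + d.2
    if 0 ≤ x ∧ 0 ≤ y then
      if open_or_closed x y fav ≠ "#" ∧ (x, y) ∉ path then steps ++ [(x, y)] else steps
    else steps) []

-- termination helpers for the path-queue loop (cited in decreasing_by)
def pvMeasureA (ps : List (List pvCell)) : Nat := (ps.map (fun p => 5 ^ (52 - p.length))).sum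

lemma pvFoldA_eq (path : List pvCell) (steps : List pvCell) (pos : PySem.Set pvCell)
    (rest : List (List pvCell)) :
    steps.foldl (fun (st : PySem.Set pvCell × List (List pvCell)) step =>
        if (path ++ [step]).length ≤ 51 then (PySem.Set.add st.1 step, st.2 ++ [path ++ [step]]) else st)
      (pos, rest)
    = if path.length + 1 ≤ 51 then
        (PySem.Set.update pos steps, rest ++ steps.map (fun s => path ++ [s]))
      else (pos, rest) := by
  simp only [List.length_append, List.length_cons, List.length_nil, Nat.zero_add]
  by_cases h : path.length + 1 ≤ 51
  · simp only [h, if_true]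
    rw [PySem.List.foldl_prod_mk (f := fun s e => PySem.Set.add s e)
        (g := fun acc e => acc ++ [path ++ [e]])]
    rw [PySem.List.foldl_append_singleton_eq_map]
    rfl
  · simp only [h, if_false]
    induction steps generalizing pos rest with
    | nil => rfl
    | cons a t ih =>
      simp only [List.foldl_cons]
      exact ih pos rest

lemma pvFoldl_len_le {β : Type} (f : List pvCell → β → List pvCell)
    (h : ∀ acc b, (f acc b).length ≤ acc.length + 1) (l : List β) (acc : List pvCell) :
    (l.foldl f acc).length ≤ acc.length + l.length := by
  induction l generalizing acc with
  | nil => simp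
  | cons b t ih =>
    calc (t.foldl f (f acc b)).length ≤ (f acc b).length + t.length := ih _
    _ ≤ acc.length + (t.length + 1) := by have := h acc b; omega
    _ = acc.length + (b :: t).length := by simp

lemma pvSteps_length (path : List pvCell) (fav : Int) : (possible_steps path fav).length ≤ 4 := by
  unfold possible_steps
  refine le_trans (pvFoldl_len_le _ (fun acc b => ?_) _ _) (by simp)
  dsimp only
  split_ifs <;> simp

lemma pvMeasureA_tail (path : List pvCell) (rest : List (List pvCell)) :
    pvMeasureA rest < pvMeasureA (path :: rest) := by
  simp only [pvMeasureA, List.map_cons, List.sum_cons]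
  have : 0 < 5 ^ (52 - path.length) := pow_pos (by norm_num) _
  omega

lemma pvMeasureA_append (path : List pvCell) (rest : List (List pvCell)) (steps : List pvCell)
    (h4 : steps.length ≤ 4) (h51 : path.length + 1 ≤ 51) :
    pvMeasureA (rest ++ steps.map (fun s => path ++ [s])) < pvMeasureA (path :: rest) := by
  have hw : (steps.map (fun s => path ++ [s])).map (fun p => 5 ^ (52 - p.length))
      = steps.map (fun _ => 5 ^ (51 - path.length)) := by
    simp only [List.map_map]
    refine List.map_congr_left (fun s _ => ?_)
    simp only [Function.comp_apply, List.length_append, List.length_cons, List.length_nil]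
    congr 1
    omega
  simp only [pvMeasureA, List.map_append, List.sum_append, List.map_cons, List.sum_cons, hw]
  have hconst : (steps.map (fun _ => 5 ^ (51 - path.length))).sum
      = steps.length * 5 ^ (51 - path.length) := by
    rw [List.map_const', List.sum_replicate, smul_eq_mul]
  rw [hconst]
  have hpow : 5 ^ (52 - path.length) = 5 * 5 ^ (51 - path.length) := by
    have h : 52 - path.length = (51 - path.length) + 1 := by omega
    rw [h, pow_succ]; ring
  have hp : 0 < 5 ^ (51 - path.length) := pow_pos (by norm_num) _
  have : steps.length * 5 ^ (51 - path.length) ≤ 4 * 5 ^ (51 - path.length) :=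
    Nat.mul_le_mul_right _ h4
  omega

def traverseLoop (fav : Int) (positions : PySem.Set pvCell) (paths : List (List pvCell)) :
    List pvCell :=
  match paths with
  | [] => positions
  | path :: rest =>
    let st := (possible_steps path fav).foldl
      (fun (st : PySem.Set pvCell × List (List pvCell)) step =>
        let new_path := path ++ [step]
        if new_path.length ≤ 51 then (PySem.Set.add st.1 step, st.2 ++ [new_path]) else st)
      (positions, rest)
    traverseLoop fav st.1 st.2
  termination_by pvMeasureA paths
  decreasing_by
    simp only [dite_eq_ite]
    rw [pvFoldA_eq]
    split_ifs with h
    · exact pvMeasureA_append path rest _ (pvSteps_length path fav) h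
    · exact pvMeasureA_tail path rest

def traverse_all (start : Int × Int) (limit : Int) (fav : Int) : List (Int × Int) :=
  let positions : PySem.Set pvCell := PySem.Set.ofList [start]
  traverseLoop fav positions [[start]]

-- ===== PORT B =====
def pvParity (p : Nat) (num : Nat) : Nat :=
  if num = 0 then p else pvParity (p ^^^ (num &&& 1)) (num / 2)
  termination_by num
  decreasing_by omega

def is_open (x y fav : Int) : Bool :=
  let num := (x * x + 3 * x + 2 * x * y + y + y * y + fav).natAbs  -- abs(...)
  pvParity 0 num == 0

def pvDirsB : List (Int × Int) := [(0, -1), (1, 0), (0, 1), (-1, 0)]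

-- the body of B's direction loop (depth is an int in Python but is always ≥ 0: Nat is exact)
def pvStepB (fav : Int) (d : Nat) (st : PySem.Set pvCell × List pvCell × List (pvCell × Nat))
    (n : pvCell) : PySem.Set pvCell × List pvCell × List (pvCell × Nat) :=
  if 0 ≤ n.1 ∧ 0 ≤ n.2 ∧ n ∉ st.1 ∧ is_open n.1 n.2 fav = true then
    (PySem.Set.add st.1 n, st.2.1 ++ [n], st.2.2 ++ [(n, d + 1)])
  else st

-- termination helpers for B's queue loop (cited in decreasing_by)
def pvMeasureB (pending : List (pvCell × Nat)) : Nat :=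
  (pending.map (fun e => 5 ^ (51 - e.2))).sum

lemma pvFoldB_third (fav : Int) (d : Nat) (cs : List pvCell)
    (st : PySem.Set pvCell × List pvCell × List (pvCell × Nat)) :
    ∃ E : List (pvCell × Nat), (cs.foldl (pvStepB fav d) st).2.2 = st.2.2 ++ E ∧
      E.length ≤ cs.length ∧ ∀ e ∈ E, e.2 = d + 1 := by
  induction cs generalizing st with
  | nil => exact ⟨[], by simp⟩
  | cons c t ih =>
    simp only [List.foldl_cons]
    rcases ih (pvStepB fav d st c) with ⟨E, hE, hlen, hall⟩
    by_cases h : 0 ≤ c.1 ∧ 0 ≤ c.2 ∧ c ∉ st.1 ∧ is_open c.1 c.2 fav = true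
    · refine ⟨(c, d + 1) :: E, ?_, by simpa using Nat.succ_le_succ hlen, ?_⟩
      · rw [hE]; simp [pvStepB, h]
      · intro e he
        rcases List.mem_cons.mp he with rfl | he
        · rfl
        · exact hall e he
    · refine ⟨E, ?_, Nat.le_succ_of_le hlen, hall⟩
      rw [hE]; simp [pvStepB, h]

lemma pvMeasureB_tail (e : pvCell × Nat) (rest : List (pvCell × Nat)) :
    pvMeasureB rest < pvMeasureB (e :: rest) := by
  simp only [pvMeasureB, List.map_cons, List.sum_cons]
  have : 0 < 5 ^ (51 - e.2) := pow_pos (by norm_num) _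
  omega

lemma pvMeasureB_append (c : pvCell) (d : Nat) (rest E : List (pvCell × Nat))
    (hd : ¬ 50 ≤ d) (h4 : E.length ≤ 4) (hall : ∀ e ∈ E, e.2 = d + 1) :
    pvMeasureB (rest ++ E) < pvMeasureB ((c, d) :: rest) := by
  have hw : E.map (fun e => 5 ^ (51 - e.2)) = E.map (fun _ => 5 ^ (50 - d)) := by
    refine List.map_congr_left (fun e he => ?_)
    rw [hall e he]
    congr 1
    omega
  simp only [pvMeasureB, List.map_append, List.sum_append, List.map_cons, List.sum_cons, hw]
  have hconst : (E.map (fun _ => 5 ^ (50 - d))).sum = E.length * 5 ^ (50 - d) := by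
    rw [List.map_const', List.sum_replicate, smul_eq_mul]
  rw [hconst]
  have hpow : 5 ^ (51 - d) = 5 * 5 ^ (50 - d) := by
    have h : 51 - d = (50 - d) + 1 := by omega
    rw [h, pow_succ]; ring
  have hp : 0 < 5 ^ (50 - d) := pow_pos (by norm_num) _
  have : E.length * 5 ^ (50 - d) ≤ 4 * 5 ^ (50 - d) := Nat.mul_le_mul_right _ h4
  omega

def bfsLoop (fav : Int) (seen : PySem.Set pvCell) (order : List pvCell)
    (pending : List (pvCell × Nat)) : List pvCell :=
  match pending with
  | [] => order
  | ((x, y), d) :: rest =>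
    if 50 ≤ d then bfsLoop fav seen order rest
    else
      let st := pvDirsB.foldl (fun st dd => pvStepB fav d st (x + dd.1, y + dd.2))
        (seen, order, rest)
      bfsLoop fav st.1 st.2.1 st.2.2
  termination_by pvMeasureB pending
  decreasing_by
    · exact pvMeasureB_tail _ rest
    · rw [← List.foldl_map]
      rcases pvFoldB_third fav d (pvDirsB.map (fun dd => ((x + dd.1, y + dd.2) : pvCell)))
        (seen, order, rest) with ⟨E, hE, hlen, hall⟩
      rw [hE]
      exact pvMeasureB_append (x, y) d rest E (by assumption)
        (le_trans hlen (by simp [pvDirsB])) hall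

def traverse_all_alt (start : Int × Int) (limit : Int) (fav : Int) : List (Int × Int) :=
  let seen : PySem.Set pvCell := PySem.Set.ofList [start]
  bfsLoop fav seen [start] [(start, 0)]

-- ===== PRECONDITION & SPEC =====
def Spec_traverse_all (start : Int × Int) (limit : Int) (fav : Int) (out : List (Int × Int)) : Prop := out = traverse_all_alt start limit fav
instance (start : Int × Int) (limit : Int) (fav : Int) (out : List (Int × Int)) : Decidable (Spec_traverse_all start limit fav out) := by unfold Spec_traverse_all; infer_instance

-- ===== CLAIM (what is proved, stated in full; the proofs are below) =====
def Claim_equal_traverse_all : Prop := ∀ (start : Int × Int) (limit : Int) (fav : Int), Dom_traverse_all start limit fav → Spec_traverse_all start limit fav (traverse_all start limit fav)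

-- ===== LEMMAS AND PROOFS =====

lemma pvParity_eq (m : Nat) : ∀ p : Nat, p ≤ 1 → pvParity p m = (p + PySem.Int.bitCount (m : Int)) % 2 := by
  induction m using Nat.strong_induction_on with
  | _ m ih =>
    intro p hp
    by_cases h0 : m = 0
    · subst h0
      rw [pvParity]
      rw [if_pos rfl]
      simp [PySem.Int.bitCount_zero]
      omega
    · rw [pvParity, if_neg h0]
      have hm : 0 < m := Nat.pos_of_ne_zero h0
      have hr : m &&& 1 = m % 2 := Nat.and_one_is_mod m
      have hr1 : m % 2 ≤ 1 := by omega
      have hx : p ^^^ m % 2 ≤ 1 := by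
        interval_cases p
        · simpa using hr1
        · rcases (by omega : m % 2 = 0 ∨ m % 2 = 1) with h | h <;> simp [h]
      rw [hr, ih (m / 2) (by omega) _ hx]
      rw [PySem.Int.bitCount_natCast hm]
      have hxor : p ^^^ m % 2 = (p + m % 2) % 2 := by
        rcases (by omega : p = 0 ∨ p = 1) with rfl | rfl <;>
        rcases (by omega : m % 2 = 0 ∨ m % 2 = 1) with h | h <;> simp [h]
      omega

lemma pvBitCount_natAbs (n : Int) : PySem.Int.bitCount n = PySem.Int.bitCount ((n.natAbs : Nat) : Int) := by
  rcases le_or_gt 0 n with h | h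
  · rw [Int.natAbs_of_nonneg h]
  · have : ((n.natAbs : Nat) : Int) = -n := Int.ofNat_natAbs_of_nonpos (le_of_lt h)
    rw [this, PySem.Int.bitCount_neg]

lemma pvOpen_iff (x y fav : Int) :
    (open_or_closed x y fav ≠ "#") ↔ is_open x y fav = true := by
  unfold open_or_closed is_open
  simp only []
  rw [pvParity_eq _ 0 (by omega)]
  rw [← pvBitCount_natAbs]
  by_cases h : PySem.Int.bitCount (x * x + 3 * x + 2 * x * y + y + y * y + fav) % 2 = 0
  · simp [h]
  · simp [h]

def pvCands (x y : Int) : List pvCell := [(x, y - 1), (x + 1, y), (x, y + 1), (x - 1, y)]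

lemma pvCands_nodup (x y : Int) : (pvCands x y).Nodup := by
  simp [pvCands, Prod.ext_iff]
  omega

lemma pvMapDirs (x y : Int) :
    pvDirsB.map (fun dd => ((x + dd.1, y + dd.2) : pvCell)) = pvCands x y := by
  simp [pvDirsB, pvCands, Prod.ext_iff]
  omega

def pvPredA (path : List pvCell) (fav : Int) (v : pvCell) : Bool :=
  decide (0 ≤ v.1) && decide (0 ≤ v.2) && decide (open_or_closed v.1 v.2 fav ≠ "#") && !decide (v ∈ path)

def pvStepsOf (path : List pvCell) (fav : Int) (u : pvCell) : List pvCell :=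
  (pvCands u.1 u.2).filter (pvPredA path fav)

lemma pvFoldA_filter (path : List pvCell) (fav : Int) (cs : List pvCell) (acc : List pvCell) :
    cs.foldl (fun steps v =>
        if 0 ≤ v.1 ∧ 0 ≤ v.2 then
          if open_or_closed v.1 v.2 fav ≠ "#" ∧ v ∉ path then steps ++ [v] else steps
        else steps) acc
    = acc ++ cs.filter (pvPredA path fav) := by
  induction cs generalizing acc with
  | nil => simp
  | cons c t ih =>
    simp only [List.foldl_cons, List.filter_cons]
    by_cases h1 : 0 ≤ c.1 ∧ 0 ≤ c.2
    · by_cases h2 : open_or_closed c.1 c.2 fav ≠ "#" ∧ c ∉ path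
      · have hp : pvPredA path fav c = true := by
          simp [pvPredA, h1.1, h1.2, h2.1, h2.2]
        rw [if_pos h1, if_pos h2, ih, hp]
        simp
      · have hp : pvPredA path fav c = false := by
          simp only [pvPredA, Bool.and_eq_false_iff]
          by_cases ho : open_or_closed c.1 c.2 fav ≠ "#"
          · right; simp [not_and] at h2; simp [h2 ho]
          · left; right; simpa using ho
        rw [if_pos h1, if_neg h2, ih, hp]
        simp
    · have hp : pvPredA path fav c = false := by
        simp only [pvPredA, Bool.and_eq_false_iff]
        left; left
        rcases not_and_or.mp h1 with h | h
        · left; simpa using h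
        · right; simpa using h
      rw [if_neg h1, ih, hp]
      simp

lemma pvSteps_eq (path : List pvCell) (fav : Int) (u : pvCell) (h : path.getLast? = some u) :
    possible_steps path fav = pvStepsOf path fav u := by
  unfold possible_steps
  rw [PySem.List.pyGet?_neg_one, h]
  show (pvDirsB.map (fun dd => ((u.1 + dd.1, u.2 + dd.2) : pvCell))).foldl
      (fun steps v =>
        if 0 ≤ v.1 ∧ 0 ≤ v.2 then
          if open_or_closed v.1 v.2 fav ≠ "#" ∧ v ∉ path then steps ++ [v] else steps
        else steps) [] = _
  rw [pvMapDirs, pvFoldA_filter]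
  rfl

def pvPredB (seen : List pvCell) (fav : Int) (v : pvCell) : Bool :=
  decide (0 ≤ v.1) && decide (0 ≤ v.2) && !decide (v ∈ seen) && is_open v.1 v.2 fav

lemma pvPredB_iff (seen : List pvCell) (fav : Int) (v : pvCell) :
    pvPredB seen fav v = true ↔ (0 ≤ v.1 ∧ 0 ≤ v.2 ∧ v ∉ seen ∧ is_open v.1 v.2 fav = true) := by
  simp [pvPredB]
  tauto

lemma pvFoldB_gen (fav : Int) (d : Nat) (cs : List pvCell) (hnd : cs.Nodup) :
    ∀ (L : List pvCell) (rest : List (pvCell × Nat)),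
    cs.foldl (pvStepB fav d) (L, L, rest)
      = (L ++ cs.filter (pvPredB L fav), L ++ cs.filter (pvPredB L fav),
         rest ++ (cs.filter (pvPredB L fav)).map (fun n => (n, d + 1))) := by
  induction cs with
  | nil => intro L rest; simp
  | cons c t ih =>
    intro L rest
    have hct : c ∉ t := (List.nodup_cons.mp hnd).1
    have hnd' : t.Nodup := (List.nodup_cons.mp hnd).2
    simp only [List.foldl_cons, List.filter_cons]
    by_cases hc : 0 ≤ c.1 ∧ 0 ≤ c.2 ∧ c ∉ L ∧ is_open c.1 c.2 fav = true
    · have hstep : pvStepB fav d (L, L, rest) c = (L ++ [c], L ++ [c], rest ++ [(c, d + 1)]) := by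
        simp only [pvStepB]
        rw [if_pos hc]
        simp [PySem.Set.add_of_not_mem hc.2.2.1]
      have hpc : pvPredB L fav c = true := (pvPredB_iff L fav c).mpr hc
      rw [hstep, ih hnd' (L ++ [c]) (rest ++ [(c, d + 1)]), hpc]
      have hfilt : t.filter (pvPredB (L ++ [c]) fav) = t.filter (pvPredB L fav) := by
        refine List.filter_congr (fun v hv => ?_)
        have hvc : v ≠ c := fun h => hct (h ▸ hv)
        simp [pvPredB, List.mem_append, hvc]
      rw [hfilt]
      simp
    · have hstep : pvStepB fav d (L, L, rest) c = (L, L, rest) := by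
        simp only [pvStepB]
        rw [if_neg hc]
      have hpc : pvPredB L fav c = false := by
        rw [← Bool.not_eq_true, pvPredB_iff]
        exact hc
      rw [hstep, ih hnd' L rest, hpc]
      simp

-- what A newly inserts while processing a path ending at u equals what B inserts at (u, d)
lemma pvNews_eq (path : List pvCell) (fav : Int) (u : pvCell) (P : List pvCell)
    (hsub : ∀ c ∈ path, c ∈ P) :
    (PySem.Set.ofList (pvStepsOf path fav u)).filter (fun y => !(PySem.Set.contains P y))
      = (pvCands u.1 u.2).filter (pvPredB P fav) := by
  have hnd : (pvStepsOf path fav u).Nodup := (pvCands_nodup u.1 u.2).filter _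
  rw [PySem.Set.ofList_eq_self_of_nodup _ hnd]
  unfold pvStepsOf
  rw [List.filter_filter]
  refine List.filter_congr (fun v hv => ?_)
  -- goal: (!contains P v && pvPredA path fav v) = pvPredB P fav v
  by_cases hvP : v ∈ P
  · have hc : PySem.Set.contains P v = true := by rw [PySem.Set.contains_iff]; exact hvP
    have h2 : pvPredB P fav v = false := by
      rw [← Bool.not_eq_true, pvPredB_iff]
      intro h
      exact h.2.2.1 hvP
    rw [hc, h2]
    rfl
  · have hvpath : v ∉ path := fun h => hvP (hsub v h)
    have hc : PySem.Set.contains P v = false := by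
      rw [← Bool.not_eq_true, PySem.Set.contains_iff]
      exact hvP
    rw [hc]
    simp only [Bool.not_false, Bool.true_and, pvPredA, pvPredB]
    by_cases ho : is_open v.1 v.2 fav = true
    · have ho' : open_or_closed v.1 v.2 fav ≠ "#" := (pvOpen_iff v.1 v.2 fav).mpr ho
      simp [ho, ho', hvpath, hvP]
    · have ho' : ¬ (open_or_closed v.1 v.2 fav ≠ "#") := fun h => ho ((pvOpen_iff v.1 v.2 fav).mp h)
      simp [ho, ho']

-- A's path queue decomposes, relative to the discovered list `ord` (cells with BFS depths),
-- into "first paths" (one per pending entry, in order) and redundant paths whose processing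
-- cannot insert anything new.
inductive PvDecomp : List (pvCell × Nat) → List (List pvCell) → List (pvCell × Nat) → Prop
  | nil (ord : List (pvCell × Nat)) : PvDecomp ord [] []
  | junk (ord : List (pvCell × Nat)) (q : List pvCell) (ps : List (List pvCell))
      (pend : List (pvCell × Nat)) (u : pvCell) (du : Nat) :
      q.getLast? = some u → (u, du) ∈ ord → du + 1 ≤ q.length →
      u ∉ pend.map Prod.fst → (∀ c ∈ q, c ∈ ord.map Prod.fst) →
      PvDecomp ord ps pend → PvDecomp ord (q :: ps) pend
  | first (ord : List (pvCell × Nat)) (f : List pvCell) (ps : List (List pvCell))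
      (pend : List (pvCell × Nat)) (u : pvCell) (d : Nat) :
      f.getLast? = some u → f.length = d + 1 → (∀ c ∈ f, c ∈ ord.map Prod.fst) →
      PvDecomp ord ps pend → PvDecomp ord (f :: ps) ((u, d) :: pend)

lemma pvDecomp_append (ord ord' : List (pvCell × Nat))
    (hmono : ∀ pr ∈ ord, pr ∈ ord')
    {ps : List (List pvCell)} {pend : List (pvCell × Nat)}
    (h1 : PvDecomp ord ps pend) :
    ∀ {cs : List (List pvCell)} {E : List (pvCell × Nat)},
    PvDecomp ord' cs E → (∀ e ∈ E, e.1 ∉ ord.map Prod.fst) →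
    PvDecomp ord' (ps ++ cs) (pend ++ E) := by
  have hmono' : ∀ c ∈ ord.map Prod.fst, c ∈ ord'.map Prod.fst := by
    intro c hc
    rcases List.mem_map.mp hc with ⟨pr, hpr, rfl⟩
    exact List.mem_map.mpr ⟨pr, hmono pr hpr, rfl⟩
  induction h1 with
  | nil => intro cs E h2 hE; simpa using h2
  | junk q ps pend u du hlast hmem hlen hnp hcells hrec ih =>
    intro cs E h2 hE
    refine PvDecomp.junk _ q _ _ u du hlast (hmono _ hmem) hlen ?_
      (fun c hc => hmono' c (hcells c hc)) (ih h2 hE)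
    simp only [List.map_append, List.mem_append]
    rintro (h | h)
    · exact hnp h
    · rcases List.mem_map.mp h with ⟨e, he, heq⟩
      exact hE e he (heq ▸ List.mem_map.mpr ⟨(u, du), hmem, rfl⟩)
  | first f ps pend u d hlast hlen hcells hrec ih =>
    intro cs E h2 hE
    exact PvDecomp.first _ f _ _ u d hlast hlen (fun c hc => hmono' c (hcells c hc)) (ih h2 hE)

lemma pvDecomp_junkChildren (ord : List (pvCell × Nat)) (q : List pvCell) (vs : List pvCell)
    (hok : ∀ v ∈ vs, ∃ dv, (v, dv) ∈ ord ∧ dv + 1 ≤ q.length + 1)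
    (hcells : ∀ c ∈ q, c ∈ ord.map Prod.fst) :
    PvDecomp ord (vs.map (fun s => q ++ [s])) [] := by
  induction vs with
  | nil => exact .nil _
  | cons v t ih =>
    obtain ⟨dv, hmem, hle⟩ := hok v (by simp)
    simp only [List.map_cons]
    refine PvDecomp.junk _ _ _ _ v dv (by simp) hmem (by simp; omega) (by simp) ?_
      (ih (fun w hw => hok w (by simp [hw])))
    intro c hc
    rcases List.mem_append.mp hc with h | h
    · exact hcells c h
    · rw [List.mem_singleton.mp h]
      exact List.mem_map.mpr ⟨(v, dv), hmem, rfl⟩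

lemma pvDecomp_children (ord' : List (pvCell × Nat)) (f : List pvCell) (d : Nat)
    (P : List pvCell) (vs : List pvCell)
    (hflen : f.length = d + 1)
    (hfcells : ∀ c ∈ f, c ∈ ord'.map Prod.fst)
    (hold : ∀ v ∈ vs, v ∈ P → ∃ dv, (v, dv) ∈ ord' ∧ dv ≤ d + 1)
    (hnewmem : ∀ v ∈ vs, v ∈ ord'.map Prod.fst) :
    PvDecomp ord' (vs.map (fun s => f ++ [s]))
      ((vs.filter (fun v => !(PySem.Set.contains P v))).map (fun v => (v, d + 1))) := by
  induction vs with
  | nil => exact .nil _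
  | cons v t ih =>
    have ih' := ih (fun w hw h => hold w (by simp [hw]) h) (fun w hw => hnewmem w (by simp [hw]))
    simp only [List.map_cons, List.filter_cons]
    by_cases hv : v ∈ P
    · have hc : (!(PySem.Set.contains P v)) = false := by
        rw [(PySem.Set.contains_iff P v).2 hv]
        rfl
      rw [hc]
      obtain ⟨dv, hm, hle⟩ := hold v (by simp) hv
      refine PvDecomp.junk _ _ _ _ v dv (by simp) hm (by simp [hflen]; omega) ?_ ?_ (by simpa using ih')
      · simp only [List.map_map]
        intro hmem
        rcases List.mem_map.mp hmem with ⟨w, hw, heq⟩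
        have heq' : w = v := heq
        subst heq'
        have hnP : w ∉ P := by simpa using List.of_mem_filter hw
        exact hnP hv
      · intro c hc'
        rcases List.mem_append.mp hc' with h | h
        · exact hfcells c h
        · rw [List.mem_singleton.mp h]
          exact hnewmem v (by simp)
    · have hc : (!(PySem.Set.contains P v)) = true := by simpa using hv
      rw [hc]
      rw [if_pos rfl]
      refine PvDecomp.first _ _ _ _ v (d + 1) (by simp) (by simp [hflen]) ?_ (by simpa using ih')
      intro c hc'
      rcases List.mem_append.mp hc' with h | h
      · exact hfcells c h
      · rw [List.mem_singleton.mp h]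
        exact hnewmem v (by simp)

lemma pvPairwise_const (d : Nat) (l : List (pvCell × Nat)) (h : ∀ e ∈ l, e.2 = d) :
    List.Pairwise (fun a b => a ≤ b) (l.map Prod.snd) := by
  induction l with
  | nil => simp
  | cons e t ih =>
    simp only [List.map_cons, List.pairwise_cons]
    refine ⟨fun b hb => ?_, ih (fun e' he' => h e' (by simp [he']))⟩
    rcases List.mem_map.mp hb with ⟨e', he', rfl⟩
    rw [h e (by simp), h e' (by simp [he'])]

lemma pvStepsOf_props (path : List pvCell) (fav : Int) (u : pvCell) (v : pvCell)
    (hv : v ∈ pvStepsOf path fav u) :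
    v ∈ pvCands u.1 u.2 ∧ 0 ≤ v.1 ∧ 0 ≤ v.2 ∧ is_open v.1 v.2 fav = true ∧ v ∉ path := by
  have hvm : v ∈ pvCands u.1 u.2 := List.mem_of_mem_filter hv
  have hvp : pvPredA path fav v = true := List.of_mem_filter hv
  simp only [pvPredA, Bool.and_eq_true, decide_eq_true_eq, Bool.not_eq_true',
    decide_eq_false_iff_not] at hvp
  exact ⟨hvm, hvp.1.1.1, hvp.1.1.2, (pvOpen_iff _ _ _).mp hvp.1.2, hvp.2⟩

lemma pvSim (fav : Int) (N : Nat) :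
    ∀ (paths : List (List pvCell)) (done pending : List (pvCell × Nat)),
    pvMeasureA paths = N →
    (((done ++ pending).map Prod.fst).Nodup) →
    (∀ e ∈ done ++ pending, ∀ e', pending.head? = some e' → e.2 ≤ e'.2 + 1) →
    List.Pairwise (fun a b => a ≤ b) (pending.map Prod.snd) →
    (∀ e ∈ done, e.2 + 1 ≤ 50 →
      ∀ v ∈ pvCands e.1.1 e.1.2, 0 ≤ v.1 → 0 ≤ v.2 → is_open v.1 v.2 fav = true →
        ∃ dv, (v, dv) ∈ done ++ pending ∧ dv ≤ e.2 + 1) →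
    PvDecomp (done ++ pending) paths pending →
    traverseLoop fav ((done ++ pending).map Prod.fst) paths
      = bfsLoop fav ((done ++ pending).map Prod.fst) ((done ++ pending).map Prod.fst) pending := by
  induction N using Nat.strong_induction_on with
  | _ N IH =>
  intro paths done pending hmeas hnd h2 h3 h4 hdec
  cases hdec with
  | nil =>
    rw [traverseLoop, bfsLoop]
  | junk q ps pend u du hlast hmem hlen hnp hcells hdec' =>
    have hudone : (u, du) ∈ done := by
      rcases List.mem_append.mp hmem with h | h
      · exact h
      · exact absurd (List.mem_map.mpr ⟨(u, du), h, rfl⟩) hnp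
    rw [traverseLoop]
    by_cases h51 : q.length + 1 ≤ 51
    · have hsteps : ∀ v ∈ possible_steps q fav, ∃ dv, (v, dv) ∈ done ++ pending ∧ dv ≤ du + 1 := by
        intro v hv
        rw [pvSteps_eq q fav u hlast] at hv
        obtain ⟨hvm, hx, hy, hop, _⟩ := pvStepsOf_props q fav u v hv
        exact h4 (u, du) hudone (by omega) v hvm hx hy hop
      have hsub : ∀ v ∈ possible_steps q fav, v ∈ (done ++ pending).map Prod.fst := by
        intro v hv
        obtain ⟨dv, hm, _⟩ := hsteps v hv
        exact List.mem_map.mpr ⟨(v, dv), hm, rfl⟩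
      have hupd : PySem.Set.update ((done ++ pending).map Prod.fst) (possible_steps q fav)
          = (done ++ pending).map Prod.fst := by
        rw [PySem.Set.update_eq_append_filter]
        have hnil : (PySem.Set.ofList (possible_steps q fav)).filter
            (fun y => !(PySem.Set.contains ((done ++ pending).map Prod.fst) y)) = [] := by
          rw [List.filter_eq_nil_iff]
          intro a ha
          rw [PySem.Set.mem_ofList] at ha
          have haP := hsub a ha
          rw [(PySem.Set.contains_iff _ a).2 haP]
          simp
        rw [hnil, List.append_nil]
      simp only [pvFoldA_eq, if_pos h51, hupd]
      have hchildren : PvDecomp (done ++ pending)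
          ((possible_steps q fav).map (fun s => q ++ [s])) [] := by
        apply pvDecomp_junkChildren
        · intro v hv
          obtain ⟨dv, hm, hdvle⟩ := hsteps v hv
          exact ⟨dv, hm, by omega⟩
        · exact hcells
      have hdec2 : PvDecomp (done ++ pending)
          (ps ++ (possible_steps q fav).map (fun s => q ++ [s])) pending := by
        have := pvDecomp_append _ _ (fun pr h => h) hdec' hchildren (by simp)
        simpa using this
      exact IH _ (by rw [← hmeas]; exact pvMeasureA_append q ps _ (pvSteps_length q fav) h51)
        _ done pending rfl hnd h2 h3 h4 hdec2
    · simp only [pvFoldA_eq, if_neg h51]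
      exact IH _ (by rw [← hmeas]; exact pvMeasureA_tail q ps) ps done pending rfl hnd h2 h3 h4 hdec'
  | first f ps pend u d hlast hflen hcells hdec' =>
    obtain ⟨ux, uy⟩ := u
    have hpendle : ∀ b ∈ pend.map Prod.snd, d ≤ b := by
      have := h3
      simp only [List.map_cons, List.pairwise_cons] at this
      exact this.1
    have hd2 : ∀ e ∈ done ++ ((ux, uy), d) :: pend, e.2 ≤ d + 1 := fun e he => h2 e he _ rfl
    rw [traverseLoop, bfsLoop]
    by_cases hd : 50 ≤ d
    · rw [if_pos hd]
      have h51 : ¬ (f.length + 1 ≤ 51) := by rw [hflen]; omega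
      simp only [pvFoldA_eq, if_neg h51]
      have hordeq : done ++ ((ux, uy), d) :: pend = (done ++ [((ux, uy), d)]) ++ pend := by simp
      have h2' : ∀ e ∈ (done ++ [((ux, uy), d)]) ++ pend, ∀ e', pend.head? = some e' →
          e.2 ≤ e'.2 + 1 := by
        intro e he e' he'
        have hde' : d ≤ e'.2 := hpendle e'.2 (List.mem_map.mpr ⟨e', List.mem_of_mem_head? he', rfl⟩)
        have := hd2 e (by rw [hordeq]; exact he)
        omega
      have h3' : List.Pairwise (fun a b => a ≤ b) (pend.map Prod.snd) := by
        have := h3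
        simp only [List.map_cons, List.pairwise_cons] at this
        exact this.2
      have h4' : ∀ e ∈ done ++ [((ux, uy), d)], e.2 + 1 ≤ 50 →
          ∀ v ∈ pvCands e.1.1 e.1.2, 0 ≤ v.1 → 0 ≤ v.2 → is_open v.1 v.2 fav = true →
            ∃ dv, (v, dv) ∈ (done ++ [((ux, uy), d)]) ++ pend ∧ dv ≤ e.2 + 1 := by
        intro e he hle v hvc hx hy hop
        rcases List.mem_append.mp he with h | h
        · obtain ⟨dv, hm, hdvle⟩ := h4 e h hle v hvc hx hy hop
          exact ⟨dv, by rw [← hordeq]; exact hm, hdvle⟩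
        · rw [List.mem_singleton.mp h] at hle
          omega
      have := IH _ (by rw [← hmeas]; exact pvMeasureA_tail f ps) ps (done ++ [((ux, uy), d)])
        pend rfl (by rw [← hordeq]; exact hnd) h2' h3' h4' (by rw [← hordeq]; exact hdec')
      rw [← hordeq] at this
      exact this
    · rw [if_neg hd]
      have h51 : f.length + 1 ≤ 51 := by rw [hflen]; omega
      simp only [pvFoldA_eq, if_pos h51]
      rw [pvSteps_eq f fav (ux, uy) hlast]
      rw [← List.foldl_map, pvMapDirs, pvFoldB_gen fav d _ (pvCands_nodup ux uy)]
      simp only []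
      have hsubP : ∀ c ∈ f, c ∈ (done ++ ((ux, uy), d) :: pend).map Prod.fst := hcells
      have hstepsfilter : (pvStepsOf f fav (ux, uy)).filter
          (fun y => !(PySem.Set.contains ((done ++ ((ux, uy), d) :: pend).map Prod.fst) y))
          = (pvCands ux uy).filter (pvPredB ((done ++ ((ux, uy), d) :: pend).map Prod.fst) fav) := by
        have h := pvNews_eq f fav (ux, uy) ((done ++ ((ux, uy), d) :: pend).map Prod.fst) hsubP
        dsimp only at h
        rw [PySem.Set.ofList_eq_self_of_nodup (pvStepsOf f fav (ux, uy))
          (by exact (pvCands_nodup ux uy).filter _)] at h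
        exact h
      have hupd : PySem.Set.update ((done ++ ((ux, uy), d) :: pend).map Prod.fst)
          (pvStepsOf f fav (ux, uy))
          = (done ++ ((ux, uy), d) :: pend).map Prod.fst
            ++ (pvCands ux uy).filter (pvPredB ((done ++ ((ux, uy), d) :: pend).map Prod.fst) fav) := by
        rw [PySem.Set.update_eq_append_filter, pvNews_eq f fav (ux, uy) _ hsubP]
      rw [hupd]
      set P := (done ++ ((ux, uy), d) :: pend).map Prod.fst with hPdef
      set news := (pvCands ux uy).filter (pvPredB P fav) with hnewsdef
      set newsE := news.map (fun n => (n, d + 1)) with hnewsEdef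
      have hordeq : (done ++ [((ux, uy), d)]) ++ (pend ++ newsE)
          = (done ++ ((ux, uy), d) :: pend) ++ newsE := by simp
      have hmapE : ((done ++ ((ux, uy), d) :: pend) ++ newsE).map Prod.fst = P ++ news := by
        rw [List.map_append, ← hPdef, hnewsEdef, List.map_map]
        congr 1
        have hid : (Prod.fst ∘ fun n : pvCell => (n, d + 1)) = id := rfl
        rw [hid, List.map_id]
      have hnewsP : ∀ v ∈ news, v ∉ P := by
        intro v hv
        exact ((pvPredB_iff P fav v).mp (List.of_mem_filter hv)).2.2.1
      have hmemP : ∀ v ∈ P, ∃ dv, (v, dv) ∈ done ++ ((ux, uy), d) :: pend ∧ dv ≤ d + 1 := by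
        intro v hv
        rcases List.mem_map.mp hv with ⟨pr, hpr, rfl⟩
        exact ⟨pr.2, by simpa using hpr, hd2 pr hpr⟩
      have h1' : (((done ++ [((ux, uy), d)]) ++ (pend ++ newsE)).map Prod.fst).Nodup := by
        rw [hordeq, hmapE, List.nodup_append]
        refine ⟨hnd, (pvCands_nodup ux uy).filter _, fun a ha b hb heq => hnewsP b hb (heq ▸ ha)⟩
      have h2' : ∀ e ∈ (done ++ [((ux, uy), d)]) ++ (pend ++ newsE),
          ∀ e', (pend ++ newsE).head? = some e' → e.2 ≤ e'.2 + 1 := by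
        intro e he e' he'
        have hde' : d ≤ e'.2 := by
          rcases List.mem_append.mp (List.mem_of_mem_head? he') with h | h
          · exact hpendle e'.2 (List.mem_map.mpr ⟨e', h, rfl⟩)
          · rcases List.mem_map.mp h with ⟨n, hn, rfl⟩
            omega
        have he2 : e.2 ≤ d + 1 := by
          rw [hordeq] at he
          rcases List.mem_append.mp he with h | h
          · exact hd2 e h
          · rcases List.mem_map.mp h with ⟨n, hn, rfl⟩
            rfl
        omega
      have h3' : List.Pairwise (fun a b => a ≤ b) ((pend ++ newsE).map Prod.snd) := by
        rw [List.map_append, List.pairwise_append]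
        refine ⟨?_, pvPairwise_const (d + 1) newsE ?_, ?_⟩
        · have h3c := h3
          simp only [List.map_cons, List.pairwise_cons] at h3c
          exact h3c.2
        · intro e he
          rcases List.mem_map.mp he with ⟨n, hn, rfl⟩
          rfl
        · intro a ha b hb
          rcases List.mem_map.mp ha with ⟨pr, hpr, rfl⟩
          rcases List.mem_map.mp hb with ⟨e, he, rfl⟩
          rcases List.mem_map.mp he with ⟨n, hn, rfl⟩
          have : pr.2 ≤ d + 1 := hd2 pr (by simp [hpr])
          simpa using this
      have h4' : ∀ e ∈ done ++ [((ux, uy), d)], e.2 + 1 ≤ 50 →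
          ∀ v ∈ pvCands e.1.1 e.1.2, 0 ≤ v.1 → 0 ≤ v.2 → is_open v.1 v.2 fav = true →
            ∃ dv, (v, dv) ∈ (done ++ [((ux, uy), d)]) ++ (pend ++ newsE) ∧ dv ≤ e.2 + 1 := by
        intro e he hle v hvc hx hy hop
        rcases List.mem_append.mp he with h | h
        · obtain ⟨dv, hm, hdvle⟩ := h4 e h hle v hvc hx hy hop
          exact ⟨dv, hordeq.symm ▸ (List.mem_append_left _ hm), hdvle⟩
        · rw [List.mem_singleton] at h
          subst h
          by_cases hvP : v ∈ P
          · obtain ⟨dv, hm, hdvle⟩ := hmemP v hvP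
            exact ⟨dv, hordeq.symm ▸ (List.mem_append_left _ hm), by omega⟩
          · have hvnews : v ∈ news :=
              List.mem_filter.mpr ⟨hvc, (pvPredB_iff P fav v).mpr ⟨hx, hy, hvP, hop⟩⟩
            exact ⟨d + 1,
              hordeq.symm ▸ (List.mem_append_right _ (List.mem_map.mpr ⟨v, hvnews, rfl⟩)), by omega⟩
      have hchild : PvDecomp ((done ++ ((ux, uy), d) :: pend) ++ newsE)
          ((pvStepsOf f fav (ux, uy)).map (fun s => f ++ [s])) newsE := by
        have hc := pvDecomp_children ((done ++ ((ux, uy), d) :: pend) ++ newsE) f d P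
          (pvStepsOf f fav (ux, uy)) hflen
          (fun c hc => by
            rw [List.map_append]
            exact List.mem_append_left _ (hcells c hc))
          (fun v hv hvP => by
            obtain ⟨dv, hm, hdvle⟩ := hmemP v hvP
            exact ⟨dv, List.mem_append_left _ hm, hdvle⟩)
          (fun v hv => by
            obtain ⟨hvc, hx, hy, hop, hnf⟩ := pvStepsOf_props f fav (ux, uy) v hv
            by_cases hvP : v ∈ P
            · rw [List.map_append]
              exact List.mem_append_left _ hvP
            · have hvnews : v ∈ news :=
                List.mem_filter.mpr ⟨hvc, (pvPredB_iff P fav v).mpr ⟨hx, hy, hvP, hop⟩⟩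
              rw [List.map_append]
              exact List.mem_append_right _
                (List.mem_map.mpr ⟨(v, d + 1), List.mem_map.mpr ⟨v, hvnews, rfl⟩, rfl⟩))
        rw [hstepsfilter] at hc
        exact hc
      have hdec1 : PvDecomp ((done ++ ((ux, uy), d) :: pend) ++ newsE)
          (ps ++ (pvStepsOf f fav (ux, uy)).map (fun s => f ++ [s])) (pend ++ newsE) := by
        refine pvDecomp_append _ _ (fun pr h => List.mem_append_left _ h) hdec' hchild ?_
        intro e he
        rcases List.mem_map.mp he with ⟨n, hn, rfl⟩
        exact hnewsP n hn
      have hmeas' : pvMeasureA (ps ++ (pvStepsOf f fav (ux, uy)).map (fun s => f ++ [s])) < N := by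
        rw [← hmeas]
        refine pvMeasureA_append f ps _ ?_ h51
        calc (pvStepsOf f fav (ux, uy)).length
            ≤ (pvCands (ux, uy).1 (ux, uy).2).length := List.length_filter_le _ _
          _ = 4 := by rfl
      have hfin := IH _ hmeas' _ (done ++ [((ux, uy), d)]) (pend ++ newsE) rfl h1' h2' h3' h4'
        (hordeq.symm ▸ hdec1)
      rw [hordeq, hmapE] at hfin
      exact hfin

-- ===== VERDICT (by name: the statement is the Claim_ definition above) =====
theorem traverse_all_spec : Claim_equal_traverse_all := by
  unfold Claim_equal_traverse_all Spec_traverse_all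
  intro start limit fav _
  have h := pvSim fav (pvMeasureA [[start]]) [[start]] [] [(start, 0)] rfl
    (by simp) (by intro e he e' he'; simp at he he'; rw [he, he'.symm]; omega) (by simp) (by simp)
    (PvDecomp.first _ [start] [] [] start 0 (by simp) (by simp) (by simp) (.nil _))
  simp only [List.nil_append, List.map_cons, List.map_nil] at h
  show traverseLoop fav (PySem.Set.ofList [start]) [[start]]
      = bfsLoop fav (PySem.Set.ofList [start]) [start] [(start, 0)]
  have hof : PySem.Set.ofList [start] = [start] := rfl
  rw [hof]
  exact h
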